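-- pv_equiv track=rewrite | github.com/nikdimentiy/mint | CodeWars/card_game.py | card_game
-- ===== SOURCE A (Python) =====
-- def card_game(n):
--     """
--     Calculate the number of cards in a game based on the given integer n.
--
--     The function uses a recursive approach to determine the number of cards
--     based on the following rules:
--     - For n <= 4, it returns predefined values.
--     - If n is odd, it returns n minus the result of card_game(n - 1).
--     - If n is even and not divisible by 4, it returns n // 2 plus the result of card_game(n // 2 - 1).
--     - If n is even and divisible by 4, it returns 1 plus the result of card_game(n - 2).
--
--     Parameters:
--     n (int): The number of cards to evaluate.
--
--     Returns:
--     int: The calculated number of cards.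
--     """
--     # Base cases for small values of n
--     if n <= 4:
--         return [0, 1, 1, 2, 3][n]
--
--     # If n is odd, use the recursive formula for odd numbers
--     if n & 1:
--         return n - card_game(n - 1)
--
--     # If n is even and not divisible by 4, use the recursive formula for even numbers
--     if n & 2:
--         return n // 2 + card_game(n // 2 - 1)
--
--     # If n is even and divisible by 4, use the recursive formula for this case
--     return 1 + card_game(n - 2)
-- ===== SOURCE B (Python) =====
-- def card_game(n):
--     """Iterative reformulation: maintain an accumulator and a sign instead of recursing."""
--     acc, sign = 0, 1
--     while n > 4:
--         if n & 1:
--             acc += sign * n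
--             sign = -sign
--             n -= 1
--         elif n & 2:
--             acc += sign * (n // 2)
--             n = n // 2 - 1
--         else:
--             acc += sign
--             n -= 2
--     return acc + sign * [0, 1, 1, 2, 3][n]
-- ===== Notes on version B (the rewrite author's own statement) =====
-- stated objective: alternative
-- what changed: Replaces the recursion with an explicit iterative loop that carries an accumulator and a sign, so no call stack is used.
-- outside the precondition, e.g. on card_game(-6): A raises IndexError, B raises IndexError
import Mathlib
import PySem

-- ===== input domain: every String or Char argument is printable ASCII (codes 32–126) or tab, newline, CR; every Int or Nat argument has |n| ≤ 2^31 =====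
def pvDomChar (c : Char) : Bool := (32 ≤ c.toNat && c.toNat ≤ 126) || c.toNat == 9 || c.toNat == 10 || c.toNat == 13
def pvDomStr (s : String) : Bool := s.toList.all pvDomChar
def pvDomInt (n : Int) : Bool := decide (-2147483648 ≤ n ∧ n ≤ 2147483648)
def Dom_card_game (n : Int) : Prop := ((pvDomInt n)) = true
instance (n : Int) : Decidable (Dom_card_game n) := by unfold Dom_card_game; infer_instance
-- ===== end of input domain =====

-- B replaces A's recursion by an explicit loop carrying an accumulator and a sign (alternative decomposition, no speed claim).

-- ===== PORT A =====
-- Literal port of the recursive A; [0,1,1,2,3][n] is pyGet? (negative index from the end,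
-- none = IndexError, excluded by Pre_); n & 1 / n & 2 are PySem.Int.band; n // 2 is floordiv.
-- The Nat fuel only makes the recursion total: every recursive call strictly decreases n.toNat,
-- so with fuel n.toNat + 1 it is never exhausted.
def cardGameGo (fuel : Nat) (n : Int) : Int :=
  match fuel with
  | 0 => (PySem.List.pyGet? ([0, 1, 1, 2, 3] : List Int) n).getD 0
  | fuel + 1 =>
    if n ≤ 4 then (PySem.List.pyGet? ([0, 1, 1, 2, 3] : List Int) n).getD 0
    else if PySem.Int.band n 1 ≠ 0 then n - cardGameGo fuel (n - 1)
    else if PySem.Int.band n 2 ≠ 0 then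
      PySem.Int.floordiv n 2 + cardGameGo fuel (PySem.Int.floordiv n 2 - 1)
    else 1 + cardGameGo fuel (n - 2)

def card_game (n : Int) : Int := cardGameGo (n.toNat + 1) n

-- ===== PORT B =====
-- Literal port of Source B's while-loop: state (n, acc, sign), ending with the same base-case list;
-- same fuel discipline (each iteration strictly decreases n.toNat).
def cardLoopGo (fuel : Nat) (n acc sign : Int) : Int :=
  match fuel with
  | 0 => acc + sign * (PySem.List.pyGet? ([0, 1, 1, 2, 3] : List Int) n).getD 0
  | fuel + 1 =>
    if n > 4 then
      if PySem.Int.band n 1 ≠ 0 then cardLoopGo fuel (n - 1) (acc + sign * n) (-sign)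
      else if PySem.Int.band n 2 ≠ 0 then
        cardLoopGo fuel (PySem.Int.floordiv n 2 - 1) (acc + sign * PySem.Int.floordiv n 2) sign
      else cardLoopGo fuel (n - 2) (acc + sign) sign
    else acc + sign * (PySem.List.pyGet? ([0, 1, 1, 2, 3] : List Int) n).getD 0

def card_game_alt (n : Int) : Int := cardLoopGo (n.toNat + 1) n 0 1

-- ===== PRECONDITION & SPEC =====
-- Pre_ excludes n ≤ -6, where Python A (and B alike) raises IndexError on the base-case list.
def Pre_card_game (n : Int) : Prop := -5 ≤ n
instance (n : Int) : Decidable (Pre_card_game n) := by unfold Pre_card_game; infer_instance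
def pvWitness_card_game : Int := (10)

def Spec_card_game (n : Int) (out : Int) : Prop := out = card_game_alt n
instance (n : Int) (out : Int) : Decidable (Spec_card_game n out) := by unfold Spec_card_game; infer_instance

-- ===== CLAIM (what is proved, stated in full; the proofs are below) =====
def Claim_equal_card_game : Prop := ∀ (n : Int), Dom_card_game n → Pre_card_game n → Spec_card_game n (card_game n)

-- ===== LEMMAS AND PROOFS =====

-- Loop invariant: at equal fuel the loop computes acc + sign * (A's recursive value).
lemma cardLoopGo_eq : ∀ (k : Nat) (n acc sign : Int),
    cardLoopGo k n acc sign = acc + sign * cardGameGo k n := by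
  intro k
  induction k with
  | zero => intro n acc sign; simp [cardLoopGo, cardGameGo]
  | succ k ih =>
    intro n acc sign
    simp only [cardLoopGo, cardGameGo]
    by_cases h4 : n ≤ 4
    · rw [if_neg (by omega), if_pos h4]
    · rw [if_pos (by omega), if_neg h4]
      split_ifs <;> rw [ih] <;> ring

-- ===== VERDICT (by name: the statement is the Claim_ definition above) =====
theorem card_game_spec : Claim_equal_card_game := by
  intro n _ _
  simp only [Spec_card_game, card_game_alt, card_game]
  rw [cardLoopGo_eq]
  ring
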